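-- pv_equiv track=rewrite | github.com/elw1s/CSE321-IntroductionToAlgorithm | HW4/cutting_1901042648.py | cutter
-- ===== SOURCE A (Python) =====
-- import math
--
-- def cutter(n):
--     count = 0
--
--     if n == 1:
--         return 1
--     else:
--         count += cutter(math.floor(n/2))
--         count += 1
--
--     return count
-- ===== SOURCE B (Python) =====
-- def cutter(n):
--     # closed form: for n >= 1, the number of halvings of n down to 1 (inclusive count)
--     # equals the bit length of n
--     return n.bit_length()
-- ===== Notes on version B (the rewrite author's own statement) =====
-- stated objective: idiomatic
-- what changed: Replaced the self-recursion counting halvings with the closed form n.bit_length().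
import Mathlib
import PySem

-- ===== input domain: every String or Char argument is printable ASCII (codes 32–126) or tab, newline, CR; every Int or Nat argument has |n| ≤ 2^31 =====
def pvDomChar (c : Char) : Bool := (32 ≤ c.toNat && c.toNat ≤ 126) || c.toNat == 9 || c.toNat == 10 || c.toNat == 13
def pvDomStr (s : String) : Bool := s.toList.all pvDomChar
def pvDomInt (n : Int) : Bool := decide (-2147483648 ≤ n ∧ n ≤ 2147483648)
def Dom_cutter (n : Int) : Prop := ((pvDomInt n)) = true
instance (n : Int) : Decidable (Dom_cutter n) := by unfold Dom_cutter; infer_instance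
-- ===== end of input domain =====

-- B replaces A's halving recursion with the closed form n.bit_length() (idiomatic; timing not measurably different at tested sizes).

-- ===== PORT A =====
-- A recurses on n via cutter(math.floor(n/2)); fuel n.toNat bounds the recursion depth
-- (for 1 ≤ n the depth is at most n halvings; math.floor(n/2) on |n| ≤ 2^31 is exactly n // 2).
def cutterGo : Nat → Int → Int
  | 0, _ => 0
  | f + 1, n =>
    if n = 1 then 1
    else cutterGo f (PySem.Int.floordiv n 2) + 1

def cutter (n : Int) : Int := cutterGo n.toNat n

-- ===== PORT B =====
def cutter_alt (n : Int) : Int := (PySem.Int.bitLength n : Int)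

-- ===== PRECONDITION & SPEC =====
-- Pre_ excludes n ≤ 0, where the Python A never reaches 1 and raises RecursionError.
def Pre_cutter (n : Int) : Prop := 1 ≤ n
instance (n : Int) : Decidable (Pre_cutter n) := by unfold Pre_cutter; infer_instance
def pvWitness_cutter : Int := 5

def Spec_cutter (n : Int) (out : Int) : Prop := out = cutter_alt n
instance (n : Int) (out : Int) : Decidable (Spec_cutter n out) := by unfold Spec_cutter; infer_instance

-- ===== CLAIM (what is proved, stated in full; the proofs are below) =====
def Claim_equal_cutter : Prop := ∀ (n : Int), Dom_cutter n → Pre_cutter n → Spec_cutter n (cutter n)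

-- ===== LEMMAS AND PROOFS =====

theorem cutterGo_eq_bitLength (f : Nat) : ∀ (n : Int), 1 ≤ n → n.toNat ≤ f →
    cutterGo f n = (PySem.Int.bitLength n : Int) := by
  induction f with
  | zero => intro n h1 h2; omega
  | succ f ih =>
    intro n h1 h2
    simp only [cutterGo]
    by_cases h : n = 1
    · subst h; rw [if_pos rfl]; decide
    · rw [if_neg h]
      have h2' : (2 : Int) ≤ n := by omega
      have hfd : PySem.Int.floordiv n 2 = n / 2 :=
        PySem.Int.floordiv_eq_ediv_of_pos (by omega)
      have hrec := ih (PySem.Int.floordiv n 2) (by rw [hfd]; omega) (by rw [hfd]; omega)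
      have hpos : (0:Int) < n := by omega
      rw [hrec, PySem.Int.bitLength_of_pos hpos]
      push_cast
      ring

-- ===== VERDICT (by name: the statement is the Claim_ definition above) =====
theorem cutter_spec : Claim_equal_cutter := by
  intro n _ hpre
  unfold Spec_cutter cutter cutter_alt
  exact cutterGo_eq_bitLength n.toNat n hpre (le_refl _)
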